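-- pv_equiv track=rewrite | github.com/jcglqmoyx/leetcode_python | src/p1170_compare_strings_by_frequency_of_the_smallest_character.py | freq
-- ===== SOURCE A (Python) =====
-- def freq(word: str) -> int:
--     d = {}
--     for c in word:
--         if c in d:
--             d[c] += 1
--         else:
--             d[c] = 1
--     for i in range(97, 123):
--         if str(chr(i)) in d and d[str(chr(i))] != 0:
--             return d[str(chr(i))]
--     return 0
-- ===== SOURCE B (Python) =====
-- def freq(word: str) -> int:
--     filtered = [c for c in word if 'a' <= c <= 'z']
--     return filtered.count(min(filtered)) if filtered else 0
-- ===== Notes on version B (the rewrite author's own statement) =====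
-- stated objective: simpler
-- what changed: Replaces the frequency dict plus a chr(97..122) scan by filtering the word to a-z characters and counting the minimum of that filtered list directly.
import Mathlib
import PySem

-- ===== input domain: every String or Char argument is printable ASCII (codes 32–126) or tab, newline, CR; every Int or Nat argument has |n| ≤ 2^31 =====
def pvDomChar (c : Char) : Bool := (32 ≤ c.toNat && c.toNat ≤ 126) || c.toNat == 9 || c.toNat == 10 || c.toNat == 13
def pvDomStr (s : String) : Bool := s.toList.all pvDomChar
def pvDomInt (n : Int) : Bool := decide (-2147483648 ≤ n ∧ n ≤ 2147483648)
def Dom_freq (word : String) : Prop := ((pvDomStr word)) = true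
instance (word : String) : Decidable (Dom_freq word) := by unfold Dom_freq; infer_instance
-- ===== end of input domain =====

-- B replaces A's frequency dict and 26-letter scan by filtering the word to a-z and
-- counting the minimum of the filtered list (objective: simpler).

-- ===== PORT A =====
-- A's dict-building step: 'if c in d: d[c] += 1 else: d[c] = 1'
def freqStep (d : PySem.Dict Char Int) (c : Char) : PySem.Dict Char Int :=
  if d.contains c then d.modify c 0 (· + 1) else d.insert c 1

-- A's 'for i in range(97,123): if chr(i) in d and d[chr(i)] != 0: return d[chr(i)]' loop
def freqGo (d : PySem.Dict Char Int) : List Int → Int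
  | [] => 0
  | i :: rest =>
    match d.get? (Char.ofNat i.toNat) with
    | some v => if v ≠ 0 then v else freqGo d rest
    | none => freqGo d rest

def freq (word : String) : Int :=
  let d := word.toList.foldl freqStep PySem.Dict.empty
  freqGo d (PySem.List.pyRange 97 123 1)

-- ===== PORT B =====
def freq_alt (word : String) : Int :=
  let filtered := word.toList.filter (fun c => 'a' ≤ c && c ≤ 'z')
  match PySem.List.min? filtered (fun c => c) with
  | none => 0
  | some m => (filtered.count m : Int)

-- ===== PRECONDITION & SPEC =====
def Spec_freq (word : String) (out : Int) : Prop := out = freq_alt word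
instance (word : String) (out : Int) : Decidable (Spec_freq word out) := by unfold Spec_freq; infer_instance

-- ===== CLAIM (what is proved, stated in full; the proofs are below) =====
def Claim_equal_freq : Prop := ∀ (word : String), Dom_freq word → Spec_freq word (freq word)

-- ===== LEMMAS AND PROOFS =====

theorem freqStep_contains (d : PySem.Dict Char Int) (c x : Char) :
    (freqStep d c).contains x = (x == c || d.contains x) := by
  unfold freqStep
  split_ifs with h
  · simp [PySem.Dict.contains_modify]
  · simp [PySem.Dict.contains_insert]

theorem freqStep_getD (d : PySem.Dict Char Int) (c x : Char) :
    (freqStep d c).getD x 0 = if x = c then d.getD c 0 + 1 else d.getD x 0 := by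
  unfold freqStep
  by_cases h : d.contains c = true
  · rw [if_pos h, PySem.Dict.getD_modify]
  · rw [if_neg h, PySem.Dict.getD_insert]
    by_cases hx : x = c
    · rw [if_pos hx, if_pos hx, PySem.Dict.getD_of_not_contains _ _ (by simpa using h)]
      norm_num
    · rw [if_neg hx, if_neg hx]

theorem fold_contains (l : List Char) (d : PySem.Dict Char Int) (x : Char) :
    (l.foldl freqStep d).contains x = (decide (x ∈ l) || d.contains x) := by
  induction l generalizing d with
  | nil => simp
  | cons a t ih =>
    simp only [List.foldl_cons, ih, freqStep_contains, List.mem_cons]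
    by_cases hx : x = a
    · simp [hx]
    · have hba : (x == a) = false := by simp [hx]
      simp only [hba]
      simp [hx]

theorem fold_getD (l : List Char) (d : PySem.Dict Char Int) (x : Char) :
    (l.foldl freqStep d).getD x 0 = d.getD x 0 + l.count x := by
  induction l generalizing d with
  | nil => simp
  | cons a t ih =>
    simp only [List.foldl_cons, ih, freqStep_getD, List.count_cons]
    by_cases hx : x = a
    · subst hx; simp; ring
    · simp [hx]
      exact fun hax => hx hax.symm

theorem fold_get?_of_mem (l : List Char) (x : Char) (hx : x ∈ l) :
    (l.foldl freqStep PySem.Dict.empty).get? x = some ((l.count x : Int)) := by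
  have hc : (l.foldl freqStep PySem.Dict.empty).contains x = true := by
    rw [fold_contains]; simp [hx]
  have hg := fold_getD l PySem.Dict.empty x
  rw [PySem.Dict.getD_empty] at hg
  rw [PySem.Dict.contains_eq_isSome_get?] at hc
  cases hq : (l.foldl freqStep PySem.Dict.empty).get? x with
  | none => rw [hq] at hc; simp at hc
  | some v =>
    rw [PySem.Dict.getD_of_get?_eq_some _ _ hq] at hg
    rw [hg]; norm_num

theorem fold_get?_of_not_mem (l : List Char) (x : Char) (hx : x ∉ l) :
    (l.foldl freqStep PySem.Dict.empty).get? x = none := by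
  have hc : (l.foldl freqStep PySem.Dict.empty).contains x = false := by
    rw [fold_contains]; simp [hx]
  rw [PySem.Dict.get?_eq_none_iff_contains]; exact hc

theorem char_le_iff (a b : Char) : a ≤ b ↔ a.toNat ≤ b.toNat := Iff.rfl

theorem char_eq_of_toNat_eq {a b : Char} (h : a.toNat = b.toNat) : a = b :=
  Char.ext (UInt32.toNat_inj.mp h)

-- the core lemma: the A-side scan over a sorted list of valid codes equals
-- "count of the minimum of the chars of l whose code is in the list"
theorem freqGo_eq (codes : List Int) (l : List Char)
    (hb : ∀ i ∈ codes, 0 ≤ i ∧ i < 128)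
    (hs : codes.Pairwise (· < ·)) :
    freqGo (l.foldl freqStep PySem.Dict.empty) codes =
      (match PySem.List.min? (l.filter (fun c => decide ((c.toNat : Int) ∈ codes))) (fun c => c) with
       | none => 0
       | some m => ((l.filter (fun c => decide ((c.toNat : Int) ∈ codes))).count m : Int)) := by
  induction codes with
  | nil =>
    simp [freqGo, PySem.List.min?]
  | cons i rest ih =>
    have hi := hb i (by simp)
    set c := Char.ofNat i.toNat with hcdef
    have hct : (c.toNat : Int) = i := by
      have hv : Nat.isValidChar i.toNat := by unfold Nat.isValidChar; omega
      have : c.toNat = i.toNat := by rw [hcdef, Char.toNat_ofNat, if_pos hv]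
      rw [this]; omega
    by_cases hm : c ∈ l
    · -- c occurs in the word: A's scan returns count l c; the min of the filter is c
      have hget := fold_get?_of_mem l c hm
      have hcnt : 0 < l.count c := List.count_pos_iff.mpr hm
      have hA : freqGo (l.foldl freqStep PySem.Dict.empty) (i :: rest) = (l.count c : Int) := by
        simp only [freqGo]
        rw [← hcdef, hget]
        simp
        exact fun h0 => absurd h0 hcnt.ne'
      rw [hA]
      set f := l.filter (fun c => decide ((c.toNat : Int) ∈ i :: rest)) with hf
      have hcf : c ∈ f := by
        rw [hf]; exact List.mem_filter.mpr ⟨hm, by simp [hct]⟩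
      have hmin : ∀ y ∈ f, c ≤ y := by
        intro y hy
        rcases List.mem_filter.mp hy with ⟨-, hyc⟩
        have hyc' : (y.toNat : Int) ∈ i :: rest := by simpa using hyc
        rw [char_le_iff]
        rcases List.mem_cons.mp hyc' with h | h
        · omega
        · have := (List.pairwise_cons.mp hs).1 _ h
          omega
      cases hq : PySem.List.min? f (fun c => c) with
      | none =>
        rw [PySem.List.min?_eq_none_iff] at hq
        rw [hq] at hcf; simp at hcf
      | some m =>
        have hmem := PySem.List.min?_mem hq
        have hle := PySem.List.min?_isMin hq c hcf
        have hmc : m = c := le_antisymm hle (hmin m hmem)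
        rw [hmc]
        show (↑(l.count c) : Int) =
          ↑((l.filter (fun c => decide ((c.toNat : Int) ∈ i :: rest))).count c)
        rw [List.count_filter (by simp [hct])]
    · -- c does not occur: both sides ignore code i
      have hget := fold_get?_of_not_mem l c hm
      have hA : freqGo (l.foldl freqStep PySem.Dict.empty) (i :: rest) =
          freqGo (l.foldl freqStep PySem.Dict.empty) rest := by
        simp only [freqGo]
        rw [← hcdef, hget]
      have hfilt : l.filter (fun c => decide ((c.toNat : Int) ∈ i :: rest)) =
          l.filter (fun c => decide ((c.toNat : Int) ∈ rest)) := by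
        apply List.filter_congr
        intro x hx
        simp only [List.mem_cons, decide_eq_decide]
        constructor
        · rintro (h | h)
          · exfalso
            have hxc : x = c := by
              apply char_eq_of_toNat_eq
              have h1 : (c.toNat : Int) = i := hct
              omega
            exact hm (hxc ▸ hx)
          · exact h
        · exact Or.inr
      rw [hA, hfilt]
      exact ih (fun j hj => hb j (by simp [hj])) (List.pairwise_cons.mp hs).2

theorem pred_eq (c : Char) :
    (decide ((c.toNat : Int) ∈ PySem.List.pyRange 97 123 1)) = ('a' ≤ c && c ≤ 'z') := by
  have h1 : ('a' ≤ c && c ≤ 'z') = decide ('a' ≤ c ∧ c ≤ 'z') := by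
    by_cases h1 : 'a' ≤ c <;> by_cases h2 : c ≤ 'z' <;> simp [h1, h2]
  rw [h1, decide_eq_decide, PySem.List.mem_pyRange_iff_of_pos (by norm_num),
      char_le_iff, char_le_iff]
  have ha : ('a').toNat = 97 := by decide
  have hz : ('z').toNat = 122 := by decide
  rw [ha, hz]
  omega

-- ===== VERDICT (by name: the statement is the Claim_ definition above) =====
theorem freq_spec : Claim_equal_freq := by
  intro word _
  unfold Spec_freq freq freq_alt
  have hpred : (fun c : Char => decide ((c.toNat : Int) ∈ PySem.List.pyRange 97 123 1)) =
      (fun c : Char => 'a' ≤ c && c ≤ 'z') := funext pred_eq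
  have h := freqGo_eq (PySem.List.pyRange 97 123 1) word.toList (by decide) (by decide)
  rw [hpred] at h
  exact h
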